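-- pv_equiv track=rewrite | github.com/shan2312/DSA-Python-Solutions | Sliding_Window/num_subarrays_with_all_elements.py | get_count_sub_arrays_with_same_elements
-- ===== SOURCE A (Python) =====
-- from collections import defaultdict
--
-- def get_count_sub_arrays_with_same_elements(nums):
--     left = count = 0
--     count_distinct_elements = len(set(nums))
--     hashmap = defaultdict(int)
--
--     for right in range(len(nums)):
--         hashmap[nums[right]] += 1
--
--         while len(hashmap) == count_distinct_elements:
--             hashmap[nums[left]] -= 1
--             if hashmap[nums[left]] == 0:
--                 del hashmap[nums[left]]
--             left += 1
--             count += len(nums) - right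
--
--     return count
-- ===== SOURCE B (Python) =====
-- def get_count_sub_arrays_with_same_elements(nums):
--     # Simpler per-start scan: for each left, grow a fresh set rightwards until it
--     # first holds every distinct value, then all n-right extensions are complete.
--     n = len(nums)
--     k = len(set(nums))
--     total = 0
--     for left in range(n):
--         seen = set()
--         for right in range(left, n):
--             seen.add(nums[right])
--             if len(seen) == k:
--                 total += n - right
--                 break
--     return total
-- ===== Notes on version B (the rewrite author's own statement) =====
-- stated objective: simpler
-- what changed: Replaces the right-expanding sliding window (shared hashmap of counts, inner while that shrinks from the left) by an independent per-start scan: for each left a fresh set grows rightwards until it first contains all k distinct values, then n-right is added and the scan breaks.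
import Mathlib
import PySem

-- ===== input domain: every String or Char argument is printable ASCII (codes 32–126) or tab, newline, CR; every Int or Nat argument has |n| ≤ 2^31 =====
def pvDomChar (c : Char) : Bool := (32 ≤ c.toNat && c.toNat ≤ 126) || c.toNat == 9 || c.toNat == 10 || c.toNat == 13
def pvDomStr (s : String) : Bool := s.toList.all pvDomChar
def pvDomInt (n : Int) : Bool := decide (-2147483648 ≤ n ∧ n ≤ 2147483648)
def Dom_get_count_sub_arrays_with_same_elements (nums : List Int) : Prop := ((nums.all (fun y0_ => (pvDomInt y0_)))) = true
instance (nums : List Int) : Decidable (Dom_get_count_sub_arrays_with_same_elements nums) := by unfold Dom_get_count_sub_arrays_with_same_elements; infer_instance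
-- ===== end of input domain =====

-- B replaces A's right-expanding sliding window by an independent per-start scan
-- (fresh set per starting index, break at first complete window); objective: simpler.

-- ===== PORT A =====
-- the inner 'while len(hashmap) == count_distinct_elements' loop; fuel (nums.length + 1
-- at the call site) strictly exceeds the possible number of iterations, so it is the while loop
def pvWhileA (nums : List Int) (k : Nat) (right : Nat) :
    Nat → PySem.Dict Int Int → Nat → Int → (PySem.Dict Int Int × Nat × Int)
  | 0, d, left, count => (d, left, count)
  | fuel+1, d, left, count =>
    if d.size == k then
      let x := PySem.List.pyGetD nums (left : Int) 0
      let d1 := d.modify x 0 (· - 1)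
      let d2 := if d1.getD x 0 == 0 then d1.erase x else d1
      pvWhileA nums k right fuel d2 (left + 1) (count + ((nums.length : Int) - (right : Int)))
    else (d, left, count)

def get_count_sub_arrays_with_same_elements (nums : List Int) : Int :=
  let count_distinct_elements := (PySem.Set.ofList nums).length
  let st := (List.range nums.length).foldl
    (fun (st : PySem.Dict Int Int × Nat × Int) (right : Nat) =>
      match st with
      | (d, left, count) =>
        let d := d.modify (PySem.List.pyGetD nums (right : Int) 0) 0 (· + 1)
        pvWhileA nums count_distinct_elements right (nums.length + 1) d left count)
    (PySem.Dict.empty, 0, 0)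
  st.2.2

-- ===== PORT B =====
-- the inner 'for right in range(left, n): …; break' loop of Source B
def pvScanB (nums : List Int) (n k : Nat) : PySem.Set Int → List Nat → Int
  | _, [] => 0
  | seen, r :: rest =>
    let seen' := seen.add (PySem.List.pyGetD nums (r : Int) 0)
    if seen'.length == k then (n : Int) - (r : Int)
    else pvScanB nums n k seen' rest

def get_count_sub_arrays_with_same_elements_alt (nums : List Int) : Int :=
  let n := nums.length
  let k := (PySem.Set.ofList nums).length
  (List.range n).foldl
    (fun total left => total + pvScanB nums n k PySem.Set.empty (List.range' left (n - left))) 0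

-- ===== PRECONDITION & SPEC =====
def Spec_get_count_sub_arrays_with_same_elements (nums : List Int) (out : Int) : Prop := out = get_count_sub_arrays_with_same_elements_alt nums
instance (nums : List Int) (out : Int) : Decidable (Spec_get_count_sub_arrays_with_same_elements nums out) := by unfold Spec_get_count_sub_arrays_with_same_elements; infer_instance

-- ===== CLAIM (what is proved, stated in full; the proofs are below) =====
def Claim_equal_get_count_sub_arrays_with_same_elements : Prop := ∀ (nums : List Int), Dom_get_count_sub_arrays_with_same_elements nums → Spec_get_count_sub_arrays_with_same_elements nums (get_count_sub_arrays_with_same_elements nums)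

-- ===== LEMMAS AND PROOFS =====

-- the window nums[l:e] (end-exclusive)
def pvW (nums : List Int) (l e : Nat) : List Int := (nums.drop l).take (e - l)

-- the window contains every value of nums
def pvCov (nums : List Int) (l e : Nat) : Prop := ∀ x ∈ nums, x ∈ pvW nums l e

-- B's contribution for a fixed starting index l
def pvG (nums : List Int) (l : Nat) : Int :=
  pvScanB nums nums.length ((PySem.Set.ofList nums).length) PySem.Set.empty
    (List.range' l (nums.length - l))

-- the dictionary holds exactly the value counts of the window nums[l:e]
def pvInvD (nums : List Int) (d : PySem.Dict Int Int) (l e : Nat) : Prop :=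
  d.keys.Nodup ∧ (∀ x, d.contains x = true ↔ x ∈ pvW nums l e) ∧
    (∀ x, d.getD x 0 = ((pvW nums l e).count x : Int))

-- A-loop invariant after processing right indices < e
def pvPost (nums : List Int) (e : Nat) (st : PySem.Dict Int Int × Nat × Int) : Prop :=
  st.2.1 ≤ e ∧ pvInvD nums st.1 st.2.1 e ∧ ¬ pvCov nums st.2.1 e ∧
    st.2.2 = ((List.range st.2.1).map (pvG nums)).sum

theorem pvW_append (nums : List Int) (l e : Nat) (hle : l ≤ e) (he : e < nums.length) :
    pvW nums l (e+1) = pvW nums l e ++ [nums.getD e 0] := by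
  unfold pvW
  have h1 : e + 1 - l = (e - l) + 1 := by omega
  rw [h1, List.take_add_one]
  have h2 : (nums.drop l)[e-l]? = some (nums.getD e 0) := by
    rw [List.getElem?_drop]
    have h3 : l + (e - l) = e := by omega
    rw [h3, List.getElem?_eq_getElem he, List.getD_eq_getElem _ _ he]
  rw [h2]; rfl

theorem pvW_cons (nums : List Int) (l e : Nat) (hlt : l < e) (he : e ≤ nums.length) :
    pvW nums l e = nums.getD l 0 :: pvW nums (l+1) e := by
  unfold pvW
  have hl : l < nums.length := by omega
  have hd : nums.drop l = nums.getD l 0 :: nums.drop (l+1) := by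
    rw [List.getD_eq_getElem _ _ hl]; exact (List.drop_eq_getElem_cons hl)
  rw [hd]
  have h1 : e - l = (e - (l+1)) + 1 := by omega
  rw [h1, List.take_succ_cons]

theorem pvW_subset (nums : List Int) (l e : Nat) : pvW nums l e ⊆ nums := by
  unfold pvW
  exact fun x hx => List.mem_of_mem_drop (List.mem_of_mem_take hx)

theorem pvCov_mono_e (nums : List Int) (l e e' : Nat) (h : e ≤ e') :
    pvCov nums l e → pvCov nums l e' := by
  intro hc x hx
  have hs : e - l ≤ e' - l := by omega
  exact (List.take_sublist_take_left (l := nums.drop l) hs).subset (hc x hx)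

theorem pvCov_nonempty (nums : List Int) (l e : Nat) (hne : nums ≠ []) (h : pvCov nums l e) :
    l < e := by
  by_contra hc
  have he : e - l = 0 := by omega
  obtain ⟨y, hy⟩ := List.exists_mem_of_ne_nil nums hne
  have := h y hy
  simp [pvW, he] at this

theorem pvCov_anti_l (nums : List Int) (l e : Nat) (hne : nums ≠ []) :
    pvCov nums (l+1) e → pvCov nums l e := by
  intro hc
  have hlt : l + 1 < e := pvCov_nonempty nums (l+1) e hne hc
  by_cases he : e ≤ nums.length
  · intro x hx
    rw [pvW_cons nums l e (by omega) he]
    exact List.mem_cons_of_mem _ (hc x hx)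
  · -- e > length: window l..e is the whole drop, contains window (l+1)..e
    intro x hx
    have := hc x hx
    unfold pvW at this ⊢
    have h1 : nums.drop l = nums.getD l 0 :: nums.drop (l+1) ∨ nums.drop l = nums.drop (l+1) := by
      by_cases hl : l < nums.length
      · left; rw [List.getD_eq_getElem _ _ hl]; exact (List.drop_eq_getElem_cons hl)
      · right; rw [List.drop_eq_nil_of_le (by omega), List.drop_eq_nil_of_le (by omega)]
    have hmem : x ∈ nums.drop (l+1) := List.mem_of_mem_take this
    have : x ∈ nums.drop l := by
      rcases h1 with h1 | h1 <;> rw [h1]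
      · exact List.mem_cons_of_mem _ hmem
      · exact hmem
    rw [List.take_of_length_le (by simp; omega)]
    exact this

theorem pvLenSet (xs : List Int) : (PySem.Set.ofList xs).length = xs.toFinset.card := by
  rw [← List.toFinset_card_of_nodup (PySem.Set.nodup_ofList xs)]
  congr 1
  ext y
  simp [PySem.Set.mem_ofList]

theorem pvCov_iff_len (nums : List Int) (l e : Nat) :
    (PySem.Set.ofList (pvW nums l e)).length = (PySem.Set.ofList nums).length ↔ pvCov nums l e := by
  rw [pvLenSet, pvLenSet]
  have hsub : (pvW nums l e).toFinset ⊆ nums.toFinset := by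
    intro y hy
    simp only [List.mem_toFinset] at *
    exact pvW_subset nums l e hy
  constructor
  · intro h x hx
    have : (pvW nums l e).toFinset = nums.toFinset :=
      Finset.eq_of_subset_of_card_le hsub (le_of_eq h.symm)
    have := this ▸ (List.mem_toFinset.mpr hx)
    exact List.mem_toFinset.mp this
  · intro h
    have : nums.toFinset ⊆ (pvW nums l e).toFinset := by
      intro y hy
      exact List.mem_toFinset.mpr (h y (List.mem_toFinset.mp hy))
    rw [Finset.Subset.antisymm hsub this]

theorem pvSize_eq (nums : List Int) (d : PySem.Dict Int Int) (l e : Nat)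
    (h : pvInvD nums d l e) : d.size = (PySem.Set.ofList (pvW nums l e)).length := by
  obtain ⟨hnd, hmem, -⟩ := h
  rw [pvLenSet]
  have h1 : d.size = d.keys.length := by simp [PySem.Dict.size, PySem.Dict.keys]
  rw [h1, ← List.toFinset_card_of_nodup hnd]
  congr 1
  ext y
  simp only [List.mem_toFinset]
  rw [← PySem.Dict.contains_iff_mem_keys]
  exact hmem y

theorem pvGet?_erase (d : PySem.Dict Int Int) (k k' : Int) :
    (d.erase k).get? k' = if k' = k then none else d.get? k' := by
  obtain ⟨items⟩ := d
  simp only [PySem.Dict.erase, PySem.Dict.get?]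
  induction items with
  | nil => simp
  | cons p rest ih =>
    by_cases h1 : p.1 = k <;> by_cases h2 : p.1 = k' <;> simp_all

theorem pvContains_erase (d : PySem.Dict Int Int) (k k' : Int) :
    (d.erase k).contains k' = (decide (k' ≠ k) && d.contains k') := by
  rw [PySem.Dict.contains_eq_isSome_get?, PySem.Dict.contains_eq_isSome_get?, pvGet?_erase]
  by_cases h : k' = k <;> simp [h]

theorem pvGetD_erase (d : PySem.Dict Int Int) (k k' : Int) :
    (d.erase k).getD k' 0 = if k' = k then 0 else d.getD k' 0 := by
  simp only [PySem.Dict.getD, pvGet?_erase]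
  split_ifs <;> rfl

theorem pvNodup_keys_erase (d : PySem.Dict Int Int) (k : Int) (h : d.keys.Nodup) :
    (d.erase k).keys.Nodup := by
  obtain ⟨items⟩ := d
  simp only [PySem.Dict.erase, PySem.Dict.keys] at *
  exact List.Nodup.sublist ((List.filter_sublist).map _) h

theorem pvInvD_incr (nums : List Int) (d : PySem.Dict Int Int) (l e : Nat)
    (h : pvInvD nums d l e) (hle : l ≤ e) (he : e < nums.length) :
    pvInvD nums (d.modify (PySem.List.pyGetD nums (e : Int) 0) 0 (· + 1)) l (e+1) := by
  obtain ⟨hnd, hmem, hcnt⟩ := h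
  rw [PySem.List.pyGetD_natCast]
  have hW := pvW_append nums l e hle he
  generalize hgx : nums.getD e 0 = x at hW ⊢
  refine ⟨?_, ?_, ?_⟩
  · rw [PySem.Dict.keys_modify]
    exact PySem.Dict.nodup_keys_insert _ _ _ hnd
  · intro y
    rw [PySem.Dict.contains_modify, hW]
    by_cases hyx : y = x <;> simp [hyx, hmem y]
  · intro y
    rw [PySem.Dict.getD_modify, hW, List.count_append]
    by_cases hyx : y = x
    · rw [if_pos hyx, hyx, hcnt x, List.count_singleton]
      simp
    · rw [if_neg hyx, hcnt y, List.count_singleton]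
      simp
      exact fun h => hyx h.symm

theorem pvInvD_decr (nums : List Int) (d : PySem.Dict Int Int) (l e : Nat)
    (h : pvInvD nums d l e) (hlt : l < e) (he : e ≤ nums.length) :
    pvInvD nums
      (let x := PySem.List.pyGetD nums (l : Int) 0
       let d1 := d.modify x 0 (· - 1)
       if d1.getD x 0 == 0 then d1.erase x else d1) (l+1) e := by
  obtain ⟨hnd, hmem, hcnt⟩ := h
  rw [PySem.List.pyGetD_natCast]
  have hW := pvW_cons nums l e hlt he
  generalize hgx : nums.getD l 0 = x at hW ⊢
  have hcx : ((pvW nums l e).count x : Int) = ((pvW nums (l+1) e).count x : Int) + 1 := by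
    rw [hW]; simp
  have hgd : (d.modify x 0 (· - 1)).getD x 0 = ((pvW nums (l+1) e).count x : Int) := by
    rw [PySem.Dict.getD_modify]; simp [hcnt x, hcx]
  have hnd1 : (d.modify x 0 (· - 1)).keys.Nodup := by
    rw [PySem.Dict.keys_modify]; exact PySem.Dict.nodup_keys_insert _ _ _ hnd
  simp only []
  split_ifs with h0
  · -- erased: count of x in the tail window is 0
    have hc0 : (pvW nums (l+1) e).count x = 0 := by
      have h0' : (d.modify x 0 (· - 1)).getD x 0 = 0 := by simpa using h0
      rw [hgd] at h0'
      exact_mod_cast h0'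
    refine ⟨pvNodup_keys_erase _ _ hnd1, ?_, ?_⟩
    · intro y
      rw [pvContains_erase, PySem.Dict.contains_modify]
      by_cases hyx : y = x
      · have hnm : x ∉ pvW nums (l+1) e := by
          intro hm
          have := List.count_pos_iff.mpr hm
          omega
        simp [hyx, hnm]
      · have hiff : y ∈ pvW nums (l+1) e ↔ y ∈ pvW nums l e := by
          rw [hW]; simp [hyx]
        simp [hyx, hiff, hmem y]
    · intro y
      rw [pvGetD_erase]
      by_cases hyx : y = x
      · rw [if_pos hyx, hyx, hc0]
        simp
      · rw [if_neg hyx, PySem.Dict.getD_modify, if_neg hyx, hcnt y, hW]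
        simp [List.count_cons]
        exact fun h => hyx h.symm
  · -- kept: count of x in the tail window is positive
    have hcpos : 0 < (pvW nums (l+1) e).count x := by
      have h0' : (d.modify x 0 (· - 1)).getD x 0 ≠ 0 := by simpa using h0
      rw [hgd] at h0'
      by_contra hcc
      have : (pvW nums (l+1) e).count x = 0 := by omega
      simp [this] at h0'
    refine ⟨hnd1, ?_, ?_⟩
    · intro y
      rw [PySem.Dict.contains_modify]
      by_cases hyx : y = x
      · have hmx : x ∈ pvW nums (l+1) e := List.count_pos_iff.mp hcpos
        simp [hyx, hmx]
      · have hiff : y ∈ pvW nums (l+1) e ↔ y ∈ pvW nums l e := by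
          rw [hW]; simp [hyx]
        simp [hyx, hiff, hmem y]
    · intro y
      rw [PySem.Dict.getD_modify]
      by_cases hyx : y = x
      · rw [if_pos hyx, hyx, hcnt x, hcx]
        ring
      · rw [if_neg hyx, hcnt y, hW]
        simp [List.count_cons]
        exact fun h => hyx h.symm

theorem pvSet_snoc (xs : List Int) (y : Int) :
    PySem.Set.ofList (xs ++ [y]) = (PySem.Set.ofList xs).add y := by
  rw [PySem.Set.ofList_append]; rfl

theorem pvScanB_step (nums : List Int) (l r : Nat) (hl : l ≤ r) (hr : r < nums.length) :
    (PySem.Set.ofList (pvW nums l r)).add (PySem.List.pyGetD nums (r : Int) 0)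
      = PySem.Set.ofList (pvW nums l (r+1)) := by
  rw [PySem.List.pyGetD_natCast, pvW_append nums l r hl hr, pvSet_snoc]

theorem pvScanB_none (nums : List Int) (l : Nat) (hcov : ¬ pvCov nums l nums.length) :
    ∀ r, l ≤ r → pvScanB nums nums.length ((PySem.Set.ofList nums).length)
      (PySem.Set.ofList (pvW nums l r)) (List.range' r (nums.length - r)) = 0 := by
  intro r
  induction hm : nums.length - r using Nat.strong_induction_on generalizing r with
  | _ m ih =>
    intro hlr
    match m, hm with
    | 0, hm => simp [pvScanB]
    | m'+1, hm =>
      have hr : r < nums.length := by omega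
      have hrange : List.range' r (m'+1) = r :: List.range' (r+1) m' := by
        simp [List.range'_succ]
      rw [hrange]
      simp only [pvScanB, pvScanB_step nums l r hlr hr]
      have hnc : ¬ ((PySem.Set.ofList (pvW nums l (r+1))).length
          = (PySem.Set.ofList nums).length) := by
        intro hh
        exact hcov (pvCov_mono_e nums l (r+1) nums.length (by omega) ((pvCov_iff_len nums l (r+1)).mp hh))
      rw [if_neg (by simpa using hnc)]
      exact ih m' (by omega) (r+1) (by omega) (by omega)

theorem pvScanB_hit (nums : List Int) (l R : Nat) (hR : R < nums.length)
    (hcov : pvCov nums l (R+1)) (hncov : ¬ pvCov nums l R) :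
    ∀ r, l ≤ r → r ≤ R → pvScanB nums nums.length ((PySem.Set.ofList nums).length)
      (PySem.Set.ofList (pvW nums l r)) (List.range' r (nums.length - r))
      = (nums.length : Int) - (R : Int) := by
  intro r
  induction hm : R - r using Nat.strong_induction_on generalizing r with
  | _ m ih =>
    intro hlr hrR
    have hr : r < nums.length := by omega
    have hrange : List.range' r (nums.length - r) = r :: List.range' (r+1) (nums.length - (r+1)) := by
      have : nums.length - r = (nums.length - (r+1)) + 1 := by omega
      rw [this, List.range'_succ]
    rw [hrange]
    simp only [pvScanB, pvScanB_step nums l r hlr hr]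
    by_cases hre : r = R
    · subst hre
      rw [if_pos (by simpa using (pvCov_iff_len nums l (r+1)).mpr hcov)]
    · have hlt : r < R := by omega
      have hnc : ¬ ((PySem.Set.ofList (pvW nums l (r+1))).length
          = (PySem.Set.ofList nums).length) := by
        intro hh
        exact hncov (pvCov_mono_e nums l (r+1) R (by omega) ((pvCov_iff_len nums l (r+1)).mp hh))
      rw [if_neg (by simpa using hnc)]
      exact ih (R - (r+1)) (by omega) (r+1) rfl (by omega) (by omega)

theorem pvG_none (nums : List Int) (l : Nat)
    (hcov : ¬ pvCov nums l nums.length) : pvG nums l = 0 := by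
  have h0 : PySem.Set.ofList (pvW nums l l) = PySem.Set.empty := by
    unfold pvW; simp [PySem.Set.ofList, PySem.Set.empty]
  rw [pvG, ← h0]
  exact pvScanB_none nums l hcov l le_rfl

theorem pvG_hit (nums : List Int) (l R : Nat) (hR : R < nums.length) (hl : l ≤ R)
    (hcov : pvCov nums l (R+1)) (hncov : ¬ pvCov nums l R) :
    pvG nums l = (nums.length : Int) - (R : Int) := by
  have h0 : PySem.Set.ofList (pvW nums l l) = PySem.Set.empty := by
    unfold pvW; simp [PySem.Set.ofList, PySem.Set.empty]
  rw [pvG, ← h0]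
  exact pvScanB_hit nums l R hR hcov hncov l le_rfl hl

theorem pvWhileA_post (nums : List Int) (R : Nat) (hne : nums ≠ []) (hR : R < nums.length) :
    ∀ fuel l d c, l ≤ R + 1 → R + 2 ≤ fuel + l →
      pvInvD nums d l (R+1) → ¬ pvCov nums l R →
      c = ((List.range l).map (pvG nums)).sum →
      pvPost nums (R+1) (pvWhileA nums ((PySem.Set.ofList nums).length) R fuel d l c) := by
  intro fuel
  induction fuel with
  | zero =>
    intro l d c h1 h2 _ _ _
    omega
  | succ fuel ih =>
    intro l d c hlR hfuel hinv hncov hc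
    rw [pvWhileA]
    have hsz : (d.size == (PySem.Set.ofList nums).length) = true ↔ pvCov nums l (R+1) := by
      rw [pvSize_eq nums d l (R+1) hinv, beq_iff_eq]
      exact pvCov_iff_len nums l (R+1)
    by_cases hcov : pvCov nums l (R+1)
    · rw [if_pos (hsz.mpr hcov)]
      have hlR' : l < R + 1 := pvCov_nonempty nums l (R+1) hne hcov
      have hinv' := pvInvD_decr nums d l (R+1) hinv hlR' (by omega)
      have hncov' : ¬ pvCov nums (l+1) R := fun hcc => hncov (pvCov_anti_l nums l R hne hcc)
      have hc' : c + ((nums.length : Int) - (R : Int)) = ((List.range (l+1)).map (pvG nums)).sum := by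
        rw [List.range_succ, List.map_append, List.sum_append, ← hc]
        simp [pvG_hit nums l R hR (by omega) hcov hncov]
      exact ih (l+1) _ _ (by omega) (by omega) hinv' hncov' hc'
    · rw [if_neg (fun hh => hcov (hsz.mp hh))]
      exact ⟨hlR, hinv, hcov, hc⟩

theorem pvFold_post (nums : List Int) (hne : nums ≠ []) :
    ∀ e, e ≤ nums.length →
      pvPost nums e ((List.range e).foldl
        (fun (st : PySem.Dict Int Int × Nat × Int) (right : Nat) =>
          match st with
          | (d, left, count) =>
            let d := d.modify (PySem.List.pyGetD nums (right : Int) 0) 0 (· + 1)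
            pvWhileA nums ((PySem.Set.ofList nums).length) right (nums.length + 1) d left count)
        (PySem.Dict.empty, 0, 0)) := by
  intro e
  induction e with
  | zero =>
    intro _
    refine ⟨le_rfl, ⟨?_, ?_, ?_⟩, ?_, ?_⟩
    · simp [PySem.Dict.keys, PySem.Dict.empty]
    · intro x
      simp [PySem.Dict.contains_empty, pvW]
    · intro x
      simp [PySem.Dict.getD_empty, pvW]
    · intro hcc
      exact absurd (pvCov_nonempty nums 0 0 hne hcc) (by omega)
    · simp
  | succ e ih =>
    intro he
    rw [List.range_succ, List.foldl_append]
    have hpost := ih (by omega)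
    rcases hst : (List.range e).foldl
        (fun (st : PySem.Dict Int Int × Nat × Int) (right : Nat) =>
          match st with
          | (d, left, count) =>
            let d := d.modify (PySem.List.pyGetD nums (right : Int) 0) 0 (· + 1)
            pvWhileA nums ((PySem.Set.ofList nums).length) right (nums.length + 1) d left count)
        (PySem.Dict.empty, 0, 0) with ⟨d, l, c⟩
    rw [hst] at hpost
    obtain ⟨hle, hinv, hncov, hc⟩ := hpost
    simp only [List.foldl_cons, List.foldl_nil] at *
    have hinv' := pvInvD_incr nums d l e hinv hle (by omega)
    exact pvWhileA_post nums e hne (by omega) (nums.length + 1) l _ c (by omega) (by omega) hinv' hncov hc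

theorem pvTailZero (nums : List Int) (hne : nums ≠ []) :
    ∀ m l, ¬ pvCov nums l nums.length → ((List.range' l m).map (pvG nums)).sum = 0 := by
  intro m
  induction m with
  | zero => intro l _; simp
  | succ m ih =>
    intro l hcov
    rw [List.range'_succ, List.map_cons, List.sum_cons]
    rw [pvG_none nums l hcov, ih (l+1) (fun hcc => hcov (pvCov_anti_l nums l nums.length hne hcc))]
    simp

-- ===== VERDICT (by name: the statement is the Claim_ definition above) =====
theorem pvRangeSplit (l n : Nat) (h : l ≤ n) :
    List.range n = List.range l ++ List.range' l (n - l) := by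
  rw [List.range_eq_range', List.range_eq_range']
  have h2 : List.range' 0 l 1 ++ List.range' (0 + 1 * l) (n - l) 1 = List.range' 0 (l + (n - l)) 1 :=
    List.range'_append
  simp only [Nat.zero_add, Nat.one_mul] at h2
  rw [h2]
  congr 1
  omega

theorem get_count_sub_arrays_with_same_elements_spec : Claim_equal_get_count_sub_arrays_with_same_elements := by
  intro nums _
  unfold Spec_get_count_sub_arrays_with_same_elements
  by_cases hne : nums = []
  · subst hne; rfl
  · have halt : get_count_sub_arrays_with_same_elements_alt nums
        = ((List.range nums.length).map (pvG nums)).sum := by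
      unfold get_count_sub_arrays_with_same_elements_alt
      rw [PySem.List.foldl_add (g := fun left => pvScanB nums nums.length
        ((PySem.Set.ofList nums).length) PySem.Set.empty (List.range' left (nums.length - left)))]
      rw [Int.zero_add]
      rfl
    have hpost := pvFold_post nums hne nums.length le_rfl
    rcases hst : (List.range nums.length).foldl
        (fun (st : PySem.Dict Int Int × Nat × Int) (right : Nat) =>
          match st with
          | (d, left, count) =>
            let d := d.modify (PySem.List.pyGetD nums (right : Int) 0) 0 (· + 1)
            pvWhileA nums ((PySem.Set.ofList nums).length) right (nums.length + 1) d left count)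
        (PySem.Dict.empty, 0, 0) with ⟨d, l, c⟩
    rw [hst] at hpost
    obtain ⟨hle0, -, hncov0, hc0⟩ := hpost
    have hle : l ≤ nums.length := hle0
    have hncov : ¬ pvCov nums l nums.length := hncov0
    have hc : c = ((List.range l).map (pvG nums)).sum := hc0
    have ha : get_count_sub_arrays_with_same_elements nums = c := by
      show ((List.range nums.length).foldl
        (fun (st : PySem.Dict Int Int × Nat × Int) (right : Nat) =>
          match st with
          | (d, left, count) =>
            let d := d.modify (PySem.List.pyGetD nums (right : Int) 0) 0 (· + 1)
            pvWhileA nums ((PySem.Set.ofList nums).length) right (nums.length + 1) d left count)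
        (PySem.Dict.empty, 0, 0)).2.2 = c
      rw [hst]
    rw [ha, halt, hc, pvRangeSplit l nums.length hle, List.map_append, List.sum_append,
      pvTailZero nums hne (nums.length - l) l hncov]
    simp
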